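-- pv_equiv track=rewrite | github.com/pypi-data/pypi-mirror-398 | packages/myboot/myboot-0.1.10-py3-none-any.whl/myboot/core/logger.py | _convert_logging_format_to_loguru
-- ===== SOURCE A (Python) =====
-- def _convert_logging_format_to_loguru(user_format: str) -> str:
--     """
--     将标准 logging 格式转换为 loguru 格式
--
--     Args:
--         user_format: 用户提供的日志格式字符串
--
--     Returns:
--         转换后的 loguru 格式字符串
--     """
--     format_mapping = {
--         "%(asctime)s": "{time:YYYY-MM-DD HH:mm:ss}",
--         "%(name)s": "{name}",
--         "%(levelname)s": "{level: <8}",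
--         "%(message)s": "{message}",
--         "%(filename)s": "{file.name}",
--         "%(funcName)s": "{function}",
--         "%(lineno)d": "{line}",
--     }
--
--     result = user_format
--     for old, new in format_mapping.items():
--         result = result.replace(old, new)
--     return result
-- ===== SOURCE B (Python) =====
-- def _convert_logging_format_to_loguru(user_format: str) -> str:
--     """Single left-to-right scan: at each position try to match one of the
--     logging tokens and emit its loguru replacement, instead of seven
--     sequential full-string replace passes.  Equivalent because every token
--     starts with '%', no replacement value contains '%', and no token is a
--     prefix of another."""
--     format_mapping = {
--         "%(asctime)s": "{time:YYYY-MM-DD HH:mm:ss}",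
--         "%(name)s": "{name}",
--         "%(levelname)s": "{level: <8}",
--         "%(message)s": "{message}",
--         "%(filename)s": "{file.name}",
--         "%(funcName)s": "{function}",
--         "%(lineno)d": "{line}",
--     }
--     out = []
--     i = 0
--     n = len(user_format)
--     while i < n:
--         for old, new in format_mapping.items():
--             if user_format.startswith(old, i):
--                 out.append(new)
--                 i += len(old)
--                 break
--         else:
--             out.append(user_format[i])
--             i += 1
--     return "".join(out)
-- ===== Notes on version B (the rewrite author's own statement) =====
-- stated objective: alternative
-- what changed: Replaces seven sequential full-string str.replace passes by a single left-to-right scan that matches a token at each position via the mapping and emits its replacement once.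
import Mathlib
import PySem

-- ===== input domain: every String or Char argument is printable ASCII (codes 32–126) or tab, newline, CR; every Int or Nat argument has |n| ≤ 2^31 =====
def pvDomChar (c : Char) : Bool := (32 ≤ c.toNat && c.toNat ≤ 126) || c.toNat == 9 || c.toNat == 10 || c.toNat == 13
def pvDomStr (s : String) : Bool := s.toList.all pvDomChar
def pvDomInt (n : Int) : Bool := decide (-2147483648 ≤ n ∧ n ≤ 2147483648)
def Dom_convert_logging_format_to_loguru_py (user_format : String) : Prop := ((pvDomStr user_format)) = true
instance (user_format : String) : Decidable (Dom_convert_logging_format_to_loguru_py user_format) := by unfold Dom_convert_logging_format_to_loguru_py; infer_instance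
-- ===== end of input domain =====

-- B replaces A's seven sequential full-string replace passes by one left-to-right scan
-- matching a token at each position (alternative decomposition, same result).

-- ===== PORT A =====
-- A: build the mapping dict, then one str.replace pass per mapping entry.
def convert_logging_format_to_loguru_py (user_format : String) : String :=
  let format_mapping : PySem.Dict String String := PySem.Dict.mk
    [("%(asctime)s", "{time:YYYY-MM-DD HH:mm:ss}"),
     ("%(name)s", "{name}"),
     ("%(levelname)s", "{level: <8}"),
     ("%(message)s", "{message}"),
     ("%(filename)s", "{file.name}"),
     ("%(funcName)s", "{function}"),
     ("%(lineno)d", "{line}")]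
  format_mapping.items.foldl (fun result kv => PySem.Str.replace result kv.1 kv.2) user_format

-- ===== PORT B =====
-- B-side helper: the same mapping as an association list over char lists.
def lgMapping : List (List Char × List Char) :=
  [("%(asctime)s".toList, "{time:YYYY-MM-DD HH:mm:ss}".toList),
   ("%(name)s".toList, "{name}".toList),
   ("%(levelname)s".toList, "{level: <8}".toList),
   ("%(message)s".toList, "{message}".toList),
   ("%(filename)s".toList, "{file.name}".toList),
   ("%(funcName)s".toList, "{function}".toList),
   ("%(lineno)d".toList, "{line}".toList)]

-- B's while loop: at each position try the mapping entries in order (the for/else with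
-- break is the find?); on a match emit the replacement and skip the key, else copy one char.
def lgScan (s : List Char) : List Char :=
  match s with
  | [] => []
  | c :: t =>
    match lgMapping.find? (fun kr => kr.1.isPrefixOf (c :: t)) with
    | some kr => kr.2 ++ lgScan (t.drop (kr.1.length - 1))
    | none => c :: lgScan t
termination_by s.length
decreasing_by
  · simp only [List.length_cons, List.length_drop]; omega
  · simp

def convert_logging_format_to_loguru_py_alt (user_format : String) : String :=
  String.ofList (lgScan user_format.toList)

-- ===== PRECONDITION & SPEC =====
def Spec_convert_logging_format_to_loguru_py (user_format : String) (out : String) : Prop := out = convert_logging_format_to_loguru_py_alt user_format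
instance (user_format : String) (out : String) : Decidable (Spec_convert_logging_format_to_loguru_py user_format out) := by unfold Spec_convert_logging_format_to_loguru_py; infer_instance

-- ===== CLAIM (what is proved, stated in full; the proofs are below) =====
def Claim_equal_convert_logging_format_to_loguru_py : Prop := ∀ (user_format : String), Dom_convert_logging_format_to_loguru_py user_format → Spec_convert_logging_format_to_loguru_py user_format (convert_logging_format_to_loguru_py user_format)

-- ===== LEMMAS AND PROOFS =====

-- `myRepl old new s` is a structural restatement of PySem.Chars.replace (for old ≠ []).
def myRepl (old new : List Char) (s : List Char) : List Char :=
  match s with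
  | [] => []
  | c :: t =>
    if old.isPrefixOf (c :: t) then new ++ myRepl old new (t.drop (old.length - 1))
    else c :: myRepl old new t
termination_by s.length
decreasing_by
  · simp only [List.length_cons, List.length_drop]; omega
  · simp

lemma myRepl_nil (old new : List Char) : myRepl old new [] = [] := by
  simp [myRepl]

lemma myRepl_cons (old new : List Char) (c : Char) (t : List Char) :
    myRepl old new (c :: t) =
      if old.isPrefixOf (c :: t) then new ++ myRepl old new (t.drop (old.length - 1))
      else c :: myRepl old new t := by
  rw [myRepl]

lemma myRepl_not_prefix (old new : List Char) (c : Char) (t : List Char)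
    (h : ¬ old <+: (c :: t)) : myRepl old new (c :: t) = c :: myRepl old new t := by
  rw [myRepl_cons, if_neg (by simpa [List.isPrefixOf_iff_prefix] using h)]

lemma myRepl_fire (old new Y : List Char) (h : old ≠ []) :
    myRepl old new (old ++ Y) = new ++ myRepl old new Y := by
  cases old with
  | nil => exact absurd rfl h
  | cons a o' =>
    rw [List.cons_append, myRepl_cons, if_pos (by simp [List.isPrefixOf_iff_prefix])]
    simp

lemma go_eq_myRepl (old new : List Char) (h : old ≠ []) :
    ∀ (fuel : Nat) (l acc : List Char), l.length ≤ fuel →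
      PySem.Chars.replace.go old new fuel l acc = acc.reverse ++ myRepl old new l := by
  intro fuel
  induction fuel with
  | zero =>
    intro l acc hl
    have hl0 : l = [] := by cases l with | nil => rfl | cons a t => simp at hl
    subst hl0
    simp [PySem.Chars.replace.go, myRepl_nil]
  | succ f ih =>
    intro l acc hl
    cases l with
    | nil => simp [PySem.Chars.replace.go, myRepl_nil]
    | cons c t =>
      rw [PySem.Chars.replace.go]
      by_cases hp : old.isPrefixOf (c :: t)
      · rw [if_pos hp]
        obtain ⟨m, hm⟩ : ∃ m, old.length = m + 1 := by
          cases old with | nil => exact absurd rfl h | cons a o' => exact ⟨o'.length, by simp⟩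
        have hdrop : (c :: t).drop old.length = t.drop (old.length - 1) := by
          rw [hm]; simp
        rw [ih ((c :: t).drop old.length) (new.reverse ++ acc)
              (by simp only [List.length_drop]; simp at hl ⊢; omega)]
        rw [hdrop, myRepl_cons, if_pos hp]
        simp
      · rw [if_neg hp]
        rw [ih t (c :: acc) (by simpa using hl)]
        rw [myRepl_cons, if_neg hp]
        simp

lemma replace_eq_myRepl (s old new : List Char) (h : old ≠ []) :
    PySem.Chars.replace s old new = myRepl old new s := by
  rw [PySem.Chars.replace, if_neg (by simpa [List.isEmpty_iff] using h)]
  simpa using go_eq_myRepl old new h s.length s [] le_rfl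

lemma not_prefix_of_head (k s : List Char) (hk : k.head? = some '%')
    (hs : s.head? ≠ some '%') : ¬ k <+: s := by
  cases k with
  | nil => simp at hk
  | cons a k' =>
    cases s with
    | nil => simp
    | cons b s' =>
      intro hp
      rw [List.cons_prefix_cons] at hp
      simp at hk hs
      exact hs (hp.1 ▸ hk ▸ rfl)

lemma myRepl_pass (k r : List Char) (hk : k.head? = some '%') :
    ∀ (q s : List Char), ¬ k <+: q ++ s → (∀ c ∈ q.tail, c ≠ '%') →
      myRepl k r (q ++ s) = q ++ myRepl k r s := by
  intro q
  induction q with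
  | nil => intro s _ _; simp
  | cons c q' ih =>
    intro s hnp hq
    rw [List.cons_append, myRepl_not_prefix _ _ _ _ (by simpa using hnp)]
    cases q' with
    | nil => simp
    | cons d q'' =>
      have hd : d ≠ '%' := hq d (by simp)
      have h2 : ¬ k <+: (d :: q'') ++ s :=
        not_prefix_of_head _ _ hk (by simp [hd])
      rw [ih s h2 (fun x hx => hq x (by simp at hx ⊢; tauto))]
      simp

lemma myRepl_pres (k r : List Char) (hk : k.head? = some '%') (hr : r.head? = some '{') :
    ∀ (n : Nat) (s p : List Char), s.length ≤ n → (∀ c ∈ p, c ≠ '%' ∧ c ≠ '{') →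
      p <+: myRepl k r s → p <+: s := by
  have hkne : k ≠ [] := by cases k <;> simp_all
  intro n
  induction n with
  | zero =>
    intro s p hs hp hpre
    have hs0 : s = [] := by cases s with | nil => rfl | cons a t => simp at hs
    subst hs0
    rw [myRepl_nil] at hpre
    simpa using hpre
  | succ m ih =>
    intro s p hs hp hpre
    cases s with
    | nil =>
      rw [myRepl_nil] at hpre
      simpa using hpre
    | cons c t =>
      by_cases hkp : k <+: c :: t
      · obtain ⟨Y, hY⟩ := hkp
        rw [← hY, myRepl_fire _ _ _ hkne] at hpre
        cases p with
        | nil => simp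
        | cons a p' =>
          cases r with
          | nil => simp at hr
          | cons b r' =>
            rw [List.cons_append, List.cons_prefix_cons] at hpre
            simp at hr
            exact absurd (hpre.1 ▸ hr ▸ rfl) (hp a (by simp)).2
      · rw [myRepl_not_prefix _ _ _ _ hkp] at hpre
        cases p with
        | nil => simp
        | cons a p' =>
          rw [List.cons_prefix_cons] at hpre ⊢
          exact ⟨hpre.1, ih t p' (by simpa using hs)
            (fun x hx => hp x (by simp [hx])) hpre.2⟩

-- The sanity conditions equivalence rests on: every key starts with '%' and its tail
-- contains neither '%' nor '{'; every replacement starts with '{' and contains no '%'.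
def GoodL (L : List (List Char × List Char)) : Prop :=
  ∀ kr ∈ L, (kr.1).head? = some '%' ∧ (∀ c ∈ (kr.1).tail, c ≠ '%' ∧ c ≠ '{') ∧
    (kr.2).head? = some '{' ∧ (∀ c ∈ kr.2, c ≠ '%')

-- A's sequence of replace passes, over char lists.
def Fapp (L : List (List Char × List Char)) (s : List Char) : List Char :=
  L.foldl (fun acc kr => myRepl kr.1 kr.2 acc) s

lemma Fapp_nil_input : ∀ (L : List (List Char × List Char)), Fapp L [] = [] := by
  intro L
  induction L with
  | nil => rfl
  | cons kr L' ih => simpa [Fapp, myRepl_nil] using ih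

lemma Fapp_pass (q : List Char) (hq : ∀ c ∈ q.tail, c ≠ '%') :
    ∀ (L : List (List Char × List Char)), (∀ kr ∈ L, (kr.1).head? = some '%') →
      (∀ kr ∈ L, ∀ X : List Char, ¬ kr.1 <+: q ++ X) →
      ∀ s, Fapp L (q ++ s) = q ++ Fapp L s := by
  intro L
  induction L with
  | nil => intro _ _ s; rfl
  | cons kr L' ih =>
    intro hA hnp s
    have h1 : myRepl kr.1 kr.2 (q ++ s) = q ++ myRepl kr.1 kr.2 s :=
      myRepl_pass _ _ (hA kr (by simp)) q s (hnp kr (by simp) s) hq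
    calc Fapp (kr :: L') (q ++ s) = Fapp L' (myRepl kr.1 kr.2 (q ++ s)) := rfl
      _ = Fapp L' (q ++ myRepl kr.1 kr.2 s) := by rw [h1]
      _ = q ++ Fapp L' (myRepl kr.1 kr.2 s) :=
          ih (fun x hx => hA x (by simp [hx])) (fun x hx => hnp x (by simp [hx])) _
      _ = q ++ Fapp (kr :: L') s := rfl

lemma Fapp_noMatch : ∀ (L : List (List Char × List Char)), GoodL L →
    ∀ (c : Char) (t : List Char), (∀ kr ∈ L, ¬ kr.1 <+: c :: t) →
      Fapp L (c :: t) = c :: Fapp L t := by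
  intro L
  induction L with
  | nil => intro _ _ _ _; rfl
  | cons kr L' ih =>
    intro hG c t h
    obtain ⟨hk, hktail, hr, _⟩ := hG kr (by simp)
    have hstep : myRepl kr.1 kr.2 (c :: t) = c :: myRepl kr.1 kr.2 t :=
      myRepl_not_prefix _ _ _ _ (h kr (by simp))
    have h' : ∀ kr' ∈ L', ¬ kr'.1 <+: c :: myRepl kr.1 kr.2 t := by
      intro kr' hm hpre
      obtain ⟨hk', hktail', _, _⟩ := hG kr' (by simp [hm])
      cases hkr' : kr'.1 with
      | nil => rw [hkr'] at hk'; simp at hk'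
      | cons a tl =>
        rw [hkr'] at hpre hk' hktail'
        rw [List.cons_prefix_cons] at hpre
        simp at hk'
        have htl : tl <+: t :=
          myRepl_pres kr.1 kr.2 hk hr t.length t tl le_rfl
            (fun x hx => hktail' x (by simpa using hx)) hpre.2
        exact h kr' (by simp [hm])
          (by rw [hkr', List.cons_prefix_cons]; exact ⟨hpre.1, htl⟩)
    calc Fapp (kr :: L') (c :: t) = Fapp L' (myRepl kr.1 kr.2 (c :: t)) := rfl
      _ = Fapp L' (c :: myRepl kr.1 kr.2 t) := by rw [hstep]
      _ = c :: Fapp L' (myRepl kr.1 kr.2 t) :=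
          ih (fun x hx => hG x (by simp [hx])) c _ h'
      _ = c :: Fapp (kr :: L') t := rfl

lemma lgScan_nil : lgScan [] = [] := by rw [lgScan]

lemma lgScan_cons (c : Char) (t : List Char) :
    lgScan (c :: t) =
      match lgMapping.find? (fun kr => kr.1.isPrefixOf (c :: t)) with
      | some kr => kr.2 ++ lgScan (t.drop (kr.1.length - 1))
      | none => c :: lgScan t := by
  rw [lgScan]

lemma lgGood : GoodL lgMapping := by simp [GoodL, lgMapping]

lemma lgPairwise :
    lgMapping.Pairwise (fun a b => ¬ a.1 <+: b.1 ∧ ¬ b.1 <+: a.1) := by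
  simp [lgMapping, List.pairwise_cons]

lemma Fapp_eq_lgScan : ∀ (n : Nat) (s : List Char), s.length ≤ n →
    Fapp lgMapping s = lgScan s := by
  intro n
  induction n with
  | zero =>
    intro s hs
    have hs0 : s = [] := by cases s with | nil => rfl | cons a t => simp at hs
    subst hs0
    rw [Fapp_nil_input, lgScan_nil]
  | succ m ih =>
    intro s hs
    cases s with
    | nil => rw [Fapp_nil_input, lgScan_nil]
    | cons c t =>
      cases hf : lgMapping.find? (fun kr => kr.1.isPrefixOf (c :: t)) with
      | none =>
        have hall : ∀ kr ∈ lgMapping, ¬ kr.1 <+: c :: t := by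
          intro kr hm hp
          have := List.find?_eq_none.mp hf kr hm
          simp [List.isPrefixOf_iff_prefix] at this
          exact this hp
        rw [Fapp_noMatch lgMapping lgGood c t hall, lgScan_cons, hf,
          ih t (by simpa using hs)]
      | some kr =>
        obtain ⟨hpkr, L1, L2, hL, hfail⟩ := List.find?_eq_some_iff_append.mp hf
        have hmem : kr ∈ lgMapping := by rw [hL]; simp
        obtain ⟨hk, hktail, hr, hrno⟩ := lgGood kr hmem
        have hkne : kr.1 ≠ [] := by cases h : kr.1 <;> simp_all
        have hpre : kr.1 <+: c :: t := by
          simpa [List.isPrefixOf_iff_prefix] using hpkr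
        obtain ⟨rest, hrest⟩ := hpre
        -- pairwise facts between L1 entries and kr
        have hpw : ∀ kr' ∈ L1, ¬ kr'.1 <+: kr.1 ∧ ¬ kr.1 <+: kr'.1 := by
          have hP := lgPairwise
          rw [hL, List.pairwise_append] at hP
          intro kr' hm'
          exact hP.2.2 kr' hm' kr (by simp)
        have hnp1 : ∀ kr' ∈ L1, ∀ X : List Char, ¬ kr'.1 <+: kr.1 ++ X := by
          intro kr' hm' X hp
          rcases List.prefix_or_prefix_of_prefix hp (List.prefix_append kr.1 X) with h1 | h1
          · exact (hpw kr' hm').1 h1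
          · exact (hpw kr' hm').2 h1
        have hA1 : ∀ kr' ∈ L1, (kr'.1).head? = some '%' := by
          intro kr' hm'
          exact (lgGood kr' (by rw [hL]; simp [hm'])).1
        have hA2 : ∀ kr' ∈ L2, (kr'.1).head? = some '%' := by
          intro kr' hm'
          exact (lgGood kr' (by rw [hL]; simp [hm'])).1
        have hnp2 : ∀ kr' ∈ L2, ∀ X : List Char, ¬ kr'.1 <+: kr.2 ++ X := by
          intro kr' hm' X
          apply not_prefix_of_head _ _ (hA2 kr' hm')
          cases hh : kr.2 with
          | nil => rw [hh] at hr; simp at hr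
          | cons b r' =>
            rw [hh] at hr; simp at hr
            subst hr; simp
        have hrestlen : rest.length ≤ m := by
          have : (kr.1 ++ rest).length = t.length + 1 := by rw [hrest]; simp
          simp at this hs
          cases h : kr.1 with
          | nil => exact absurd h hkne
          | cons a o' => rw [h] at this; simp at this; omega
        have hdropeq : t.drop (kr.1.length - 1) = rest := by
          cases h : kr.1 with
          | nil => exact absurd h hkne
          | cons a o' =>
            rw [h, List.cons_append] at hrest
            injection hrest with h1 h2
            rw [← h2]
            simp
        calc Fapp lgMapping (c :: t)
            = Fapp L2 (myRepl kr.1 kr.2 (Fapp L1 (kr.1 ++ rest))) := by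
              rw [← hrest, hL]; simp [Fapp, List.foldl_append]
          _ = Fapp L2 (myRepl kr.1 kr.2 (kr.1 ++ Fapp L1 rest)) := by
              rw [Fapp_pass kr.1 (fun x hx => (hktail x hx).1) L1 hA1 hnp1 rest]
          _ = Fapp L2 (kr.2 ++ myRepl kr.1 kr.2 (Fapp L1 rest)) := by
              rw [myRepl_fire _ _ _ hkne]
          _ = kr.2 ++ Fapp L2 (myRepl kr.1 kr.2 (Fapp L1 rest)) := by
              rw [Fapp_pass kr.2 (fun x hx => hrno x (List.mem_of_mem_tail hx)) L2 hA2 hnp2]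
          _ = kr.2 ++ Fapp lgMapping rest := by
              rw [hL]; simp [Fapp, List.foldl_append]
          _ = kr.2 ++ lgScan rest := by rw [ih rest hrestlen]
          _ = lgScan (c :: t) := by
              rw [lgScan_cons, hf]
              exact congrArg (kr.2 ++ ·) (congrArg lgScan hdropeq.symm)

lemma portA_eq_Fapp (u : String) :
    convert_logging_format_to_loguru_py u = String.ofList (Fapp lgMapping u.toList) := by
  show (PySem.Dict.mk _ : PySem.Dict String String).items.foldl _ u = _
  simp only [List.foldl, PySem.Str.replace, String.toList_ofList]
  rw [replace_eq_myRepl _ _ _ (by decide), replace_eq_myRepl _ _ _ (by decide),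
    replace_eq_myRepl _ _ _ (by decide), replace_eq_myRepl _ _ _ (by decide),
    replace_eq_myRepl _ _ _ (by decide), replace_eq_myRepl _ _ _ (by decide),
    replace_eq_myRepl _ _ _ (by decide)]
  simp [Fapp, lgMapping, List.foldl]

-- ===== VERDICT (by name: the statement is the Claim_ definition above) =====
theorem convert_logging_format_to_loguru_py_spec : Claim_equal_convert_logging_format_to_loguru_py := by
  intro u _
  show _ = convert_logging_format_to_loguru_py_alt u
  rw [portA_eq_Fapp, convert_logging_format_to_loguru_py_alt,
    Fapp_eq_lgScan u.toList.length u.toList le_rfl]
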